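-- pv_equiv track=rewrite | github.com/Agentic-Environmental-Engineering/GymVerse | gem/gem/envs/RLVE/stunt_flying_env.py | _evaluate_sequence
-- ===== SOURCE A (Python) =====
-- from typing import Any, List, Optional, SupportsFloat, Tuple
--
-- def _evaluate_sequence(sequence: List[int], C: List[int]) -> int:
--     """Evaluate the sum C[A[i]] × T[i] for the provided sequence."""
--     K = len(C)
--     last_indices: List[Optional[int]] = [None] * K
--     total = 0
--     for i, ai in enumerate(sequence):
--         t = 0 if last_indices[ai] is None else i - last_indices[ai]
--         total += C[ai] * t
--         last_indices[ai] = i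
--     return total
-- ===== SOURCE B (Python) =====
-- from typing import List
--
-- def _evaluate_sequence(sequence: List[int], C: List[int]) -> int:
--     """Telescoped evaluation: per slot, the gaps sum to last-first occurrence index."""
--     K = len(C)
--     first = [None] * K
--     last = [None] * K
--     for i, ai in enumerate(sequence):
--         if first[ai] is None:
--             first[ai] = i
--         last[ai] = i
--     # last[k] is always set when first[k] is
--     return sum(c * (l - f) for c, f, l in zip(C, first, last) if f is not None)
-- ===== Notes on version B (the rewrite author's own statement) =====
-- stated objective: alternative
-- what changed: Replaces the running-total-of-gaps accumulation with a telescoped form: one pass records first- and last-occurrence indices per slot (same size-K arrays indexed by ai, preserving negative-index aliasing and IndexError behaviour), then a single zip pass sums C[k]*(last[k]-first[k]).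
import Mathlib
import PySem

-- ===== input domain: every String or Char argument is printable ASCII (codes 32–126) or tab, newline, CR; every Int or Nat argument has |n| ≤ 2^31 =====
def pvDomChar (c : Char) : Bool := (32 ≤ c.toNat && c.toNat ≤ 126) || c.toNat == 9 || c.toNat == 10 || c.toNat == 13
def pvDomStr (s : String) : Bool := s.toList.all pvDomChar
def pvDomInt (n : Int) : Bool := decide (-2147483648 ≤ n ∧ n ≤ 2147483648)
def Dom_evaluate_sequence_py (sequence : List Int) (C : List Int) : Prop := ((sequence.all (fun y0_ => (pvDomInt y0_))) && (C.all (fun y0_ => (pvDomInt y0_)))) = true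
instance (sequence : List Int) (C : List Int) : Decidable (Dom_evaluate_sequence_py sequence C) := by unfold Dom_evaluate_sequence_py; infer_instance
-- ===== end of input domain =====

-- B telescopes A's gap sum into first/last occurrence indices per slot (objective: alternative, same cost).

-- ===== PORT A =====
-- one iteration of A's for-loop: state = (last_indices, total); pyGetD/pySetD are
-- total forms of Python's indexing, exact under Pre_ (indices in range).
def pvAStep (C : List Int) (st : List (Option Int) × Int) (p : Int × Int) :
    List (Option Int) × Int :=
  let t : Int := match PySem.List.pyGetD st.1 p.2 none with
    | none => 0
    | some li => p.1 - li
  (PySem.List.pySetD st.1 p.2 (some p.1), st.2 + PySem.List.pyGetD C p.2 0 * t)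

def evaluate_sequence_py (sequence : List Int) (C : List Int) : Int :=
  let K := C.length
  ((PySem.List.enumerate sequence 0).foldl (pvAStep C) (List.replicate K none, 0)).2

-- ===== PORT B =====
-- one iteration of B's for-loop: state = (first, last)
def pvBStep (st : List (Option Int) × List (Option Int)) (p : Int × Int) :
    List (Option Int) × List (Option Int) :=
  ((if PySem.List.pyGetD st.1 p.2 none = none
    then PySem.List.pySetD st.1 p.2 (some p.1) else st.1),
   PySem.List.pySetD st.2 p.2 (some p.1))

-- B's final sum over zip(C, first, last); the loop sets last[k] whenever first[k] is set,
-- so the second component is matched too (Python reads the value directly there).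
def pvBSum : List (Int × (Option Int × Option Int)) → Int
  | [] => 0
  | (c, fl) :: rest =>
    (match fl.1, fl.2 with
     | some fv, some lv => c * (lv - fv)
     | _, _ => 0) + pvBSum rest

def evaluate_sequence_py_alt (sequence : List Int) (C : List Int) : Int :=
  let K := C.length
  let st := (PySem.List.enumerate sequence 0).foldl pvBStep
      (List.replicate K none, List.replicate K none)
  pvBSum (C.zip (st.1.zip st.2))

-- ===== PRECONDITION & SPEC =====
-- Pre_ excludes exactly the inputs where Python raises IndexError: some element of
-- sequence is out of range as an index into the size-K arrays (K = len(C)).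
def Pre_evaluate_sequence_py (sequence : List Int) (C : List Int) : Prop :=
  ∀ a ∈ sequence, PySem.Raise.InRange C.length a
instance (sequence : List Int) (C : List Int) : Decidable (Pre_evaluate_sequence_py sequence C) := by
  unfold Pre_evaluate_sequence_py PySem.Raise.InRange; infer_instance

def pvWitness_evaluate_sequence_py : List Int × List Int := ([0, 1, -2, 0], [2, 3])

def Spec_evaluate_sequence_py (sequence : List Int) (C : List Int) (out : Int) : Prop := out = evaluate_sequence_py_alt sequence C
instance (sequence : List Int) (C : List Int) (out : Int) : Decidable (Spec_evaluate_sequence_py sequence C out) := by unfold Spec_evaluate_sequence_py; infer_instance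

-- ===== CLAIM (what is proved, stated in full; the proofs are below) =====
def Claim_equal_evaluate_sequence_py : Prop := ∀ (sequence : List Int) (C : List Int), Dom_evaluate_sequence_py sequence C → Pre_evaluate_sequence_py sequence C → Spec_evaluate_sequence_py sequence C (evaluate_sequence_py sequence C)

-- ===== LEMMAS AND PROOFS =====

-- the Nat index a Python index i ∈ [-n, n) denotes
def pvNIdx (n : Nat) (i : Int) : Nat := if 0 ≤ i then i.toNat else n - (-i).toNat

theorem pvNIdx_lt (n : Nat) (i : Int) (h : PySem.Raise.InRange n i) : pvNIdx n i < n := by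
  rcases h with ⟨h1, h2⟩; unfold pvNIdx; split_ifs <;> omega

theorem pvPyIdx_eq (n : Nat) (i : Int) (h : PySem.Raise.InRange n i) :
    PySem.List.pyIdx? n i = some (pvNIdx n i) := by
  rcases h with ⟨h1, h2⟩
  simp only [PySem.List.pyIdx?, pvNIdx]
  split_ifs <;> simp_all

theorem pvGetD_norm {α : Type} (xs : List α) (i : Int) (d : α)
    (h : PySem.Raise.InRange xs.length i) :
    PySem.List.pyGetD xs i d = xs.getD (pvNIdx xs.length i) d := by
  have hlt := pvNIdx_lt xs.length i h
  simp [PySem.List.pyGetD, PySem.List.pyGet?, pvPyIdx_eq _ _ h,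
    List.getD_eq_getElem?_getD]

theorem pvSetD_norm {α : Type} (xs : List α) (i : Int) (v : α)
    (h : PySem.Raise.InRange xs.length i) :
    PySem.List.pySetD xs i v = xs.set (pvNIdx xs.length i) v := by
  simp [PySem.List.pySetD, PySem.List.pySet?, pvPyIdx_eq _ _ h]

theorem pvBSum_replicate (C : List Int) :
    pvBSum (C.zip ((List.replicate C.length (none : Option Int)).zip
      (List.replicate C.length (none : Option Int)))) = 0 := by
  induction C with
  | nil => rfl
  | cons c cs ih =>
    rw [List.length_cons, List.replicate_succ, List.zip_cons_cons, List.zip_cons_cons]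
    simpa [pvBSum] using ih

-- the telescoping step: updating slot j changes the sum by C[j] * t
theorem pvBSum_set (C : List Int) (f l : List (Option Int)) (j : Nat) (i : Int)
    (hf : f.length = C.length) (hl : l.length = C.length) (hj : j < C.length)
    (hc : ∀ k, k < C.length → (f.getD k none = none ↔ l.getD k none = none)) :
    pvBSum (C.zip ((if f.getD j none = none then f.set j (some i) else f).zip
      (l.set j (some i))))
      = pvBSum (C.zip (f.zip l)) +
        C.getD j 0 * (match l.getD j none with | none => 0 | some li => i - li) := by
  induction C generalizing f l j with
  | nil => simp at hj
  | cons c cs ih =>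
    match f, l with
    | f0 :: fs, l0 :: ls =>
      simp only [List.length_cons] at hf hl hj hc
      cases j with
      | zero =>
        have h0 := hc 0 (by omega)
        cases hf0 : f0 with
        | none =>
          have : l0 = none := by simpa using h0.mp (by simp [hf0])
          subst this
          simp [pvBSum]
        | some fv =>
          cases hl0 : l0 with
          | none => exact absurd (h0.mpr (by simp [hl0])) (by simp [hf0])
          | some lv => simp [pvBSum]; ring
      | succ j =>
        have hrec := ih fs ls j (by simpa using hf) (by simpa using hl)
          (by omega) (fun k hk => hc (k + 1) (by omega))
        by_cases hcond : fs.getD j none = none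
        · simp only [List.getD_cons_succ, List.set_cons_succ, hcond, if_true] at hrec ⊢
          simp [pvBSum, hrec]; ring
        · simp only [List.getD_cons_succ, List.set_cons_succ, hcond, if_false] at hrec ⊢
          simp [pvBSum, hrec]; ring

-- coupling and lengths are preserved by one B step
theorem pvStep_couple (f l : List (Option Int)) (K j : Nat) (i : Int)
    (hf : f.length = K) (hl : l.length = K) (hj : j < K)
    (hc : ∀ k, k < K → (f.getD k none = none ↔ l.getD k none = none)) :
    ∀ k, k < K → (((if f.getD j none = none then f.set j (some i) else f).getD k none = none)
      ↔ ((l.set j (some i)).getD k none = none)) := by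
  have hset_self : ∀ (xs : List (Option Int)), xs.length = K →
      (xs.set j (some i)).getD j none = some i := by
    intro xs hxs
    rw [List.getD_eq_getElem?_getD, List.getElem?_set_self (by omega)]; rfl
  have hset_ne : ∀ (xs : List (Option Int)) (k : Nat), j ≠ k →
      (xs.set j (some i)).getD k none = xs.getD k none := by
    intro xs k hne
    rw [List.getD_eq_getElem?_getD, List.getElem?_set_ne hne, ← List.getD_eq_getElem?_getD]
  intro k hk
  by_cases hkj : k = j
  · subst hkj
    by_cases hcond : f.getD k none = none
    · rw [if_pos hcond, hset_self f hf, hset_self l hl]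
    · rw [if_neg hcond, hset_self l hl]; exact iff_of_false hcond (by simp)
  · have hjk : j ≠ k := fun h => hkj h.symm
    by_cases hcond : f.getD j none = none
    · rw [if_pos hcond, hset_ne f k hjk, hset_ne l k hjk]; exact hc k hk
    · rw [if_neg hcond, hset_ne l k hjk]; exact hc k hk

-- main loop invariant: A's running total tracks the telescoped sum of B's state
theorem pvLoop (C : List Int) (seq : List Int) :
    ∀ (i : Int) (f l : List (Option Int)) (total : Int),
    (∀ a ∈ seq, PySem.Raise.InRange C.length a) →
    f.length = C.length → l.length = C.length →
    (∀ k, k < C.length → (f.getD k none = none ↔ l.getD k none = none)) →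
    ((PySem.List.enumerate seq i).foldl (pvAStep C) (l, total)).2
      = total +
        (pvBSum (C.zip ((((PySem.List.enumerate seq i).foldl pvBStep (f, l)).1).zip
          (((PySem.List.enumerate seq i).foldl pvBStep (f, l)).2)))
         - pvBSum (C.zip (f.zip l))) := by
  induction seq with
  | nil => intro i f l total _ _ _ _; simp [PySem.List.enumerate_nil]
  | cons a rest ih =>
    intro i f l total hseq hf hl hc
    have ha : PySem.Raise.InRange C.length a := hseq a (List.mem_cons_self ..)
    have hrest : ∀ b ∈ rest, PySem.Raise.InRange C.length b :=
      fun b hb => hseq b (List.mem_cons_of_mem _ hb)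
    set j := pvNIdx C.length a with hjdef
    have hj : j < C.length := pvNIdx_lt _ _ ha
    have haf : PySem.Raise.InRange f.length a := by rw [hf]; exact ha
    have hal : PySem.Raise.InRange l.length a := by rw [hl]; exact ha
    rw [PySem.List.enumerate_cons]
    simp only [List.foldl_cons]
    have hA : pvAStep C (l, total) (i, a)
        = (l.set j (some i),
           total + C.getD j 0 * (match l.getD j none with | none => 0 | some li => i - li)) := by
      simp only [pvAStep, pvGetD_norm l a none hal, pvSetD_norm l a (some i) hal,
        pvGetD_norm C a 0 ha, hl, hjdef]
    have hB : pvBStep (f, l) (i, a)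
        = ((if f.getD j none = none then f.set j (some i) else f), l.set j (some i)) := by
      simp only [pvBStep, pvGetD_norm f a none haf, pvSetD_norm f a (some i) haf,
        pvSetD_norm l a (some i) hal, hf, hl, hjdef]
    rw [hA, hB]
    have ihr := ih (i + 1)
      (if f.getD j none = none then f.set j (some i) else f) (l.set j (some i))
      (total + C.getD j 0 * (match l.getD j none with | none => 0 | some li => i - li))
      hrest (by split_ifs <;> simp [hf]) (by simp [hl])
      (pvStep_couple f l C.length j i hf hl hj hc)
    rw [ihr, pvBSum_set C f l j i hf hl hj hc]
    ring

-- ===== VERDICT (by name: the statement is the Claim_ definition above) =====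
theorem evaluate_sequence_py_spec : Claim_equal_evaluate_sequence_py := by
  intro sequence C _ hpre
  unfold Spec_evaluate_sequence_py evaluate_sequence_py evaluate_sequence_py_alt
  have h := pvLoop C sequence 0 (List.replicate C.length none)
    (List.replicate C.length none) 0 hpre (by simp) (by simp) (by intro k hk; simp)
  simp only [h, pvBSum_replicate]
  ring
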